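-- pv_equiv track=rewrite | github.com/NVakil03/GauchoDining | halp.py | tag_item
-- ===== SOURCE A (Python) =====
-- def tag_item(item):
--     item = item.lower()
--     if any(word in item for word in ["cake", "pie", "cobbler", "cookie", "brownie", "bar", "bun", "muffin", "scone"]):
--         return "dessert"
--     elif any(word in item for word in ["pizza", "burger", "burrito", "taco", "wrap", "sub", "sandwich", "quesadilla", "enchilada"]):
--         return "main_fast"
--     elif any(word in item for word in ["stir fry", "pasta", "ravioli", "lasagna", "penne"]):
--         return "main_entree"
--     elif any(word in item for word in ["soup", "chowder", "stew"]):
--         return "soup"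
--     elif any(word in item for word in ["rice", "potato", "beans", "vegetable", "corn", "salad", "spinach", "greens"]):
--         return "side"
--     elif any(word in item for word in ["oatmeal", "pancake", "waffle", "biscuit", "toast", "cereal", "french toast"]):
--         return "breakfast"
--     elif any(word in item for word in ["sauce", "salsa", "relish", "bread", "roll", "naan", "tortilla"]):
--         return "condiment_or_bread"
--     else:
--         return "other"
-- ===== SOURCE B (Python) =====
-- _CATEGORIES = ["dessert", "main_fast", "main_entree", "soup", "side",
--                "breakfast", "condiment_or_bread", "other"]
--
-- _KEYWORD_LISTS = [
--     ["cake", "pie", "cobbler", "cookie", "brownie", "bar", "bun", "muffin", "scone"],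
--     ["pizza", "burger", "burrito", "taco", "wrap", "sub", "sandwich", "quesadilla", "enchilada"],
--     ["stir fry", "pasta", "ravioli", "lasagna", "penne"],
--     ["soup", "chowder", "stew"],
--     ["rice", "potato", "beans", "vegetable", "corn", "salad", "spinach", "greens"],
--     ["oatmeal", "pancake", "waffle", "biscuit", "toast", "cereal", "french toast"],
--     ["sauce", "salsa", "relish", "bread", "roll", "naan", "tortilla"],
-- ]
--
-- # keyword -> priority index of its category (all 48 keywords are distinct)
-- _PRIORITY = {kw: p for p, kws in enumerate(_KEYWORD_LISTS) for kw in kws}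
--
-- def tag_item(item):
--     # Instead of running a substring search for each of the 48 keywords,
--     # enumerate every substring of the (lowercased) item whose length is in
--     # the keyword-length range 3..12, look it up in a keyword->priority dict,
--     # and keep the smallest priority seen; return that category (7 = "other").
--     item = item.lower()
--     best = 7
--     for i in range(len(item)):
--         for L in range(3, 13):
--             p = _PRIORITY.get(item[i:i+L])
--             if p is not None and p < best:
--                 best = p
--     return _CATEGORIES[best]
-- ===== Notes on version B (the rewrite author's own statement) =====
-- stated objective: alternative
-- what changed: Instead of running one substring search over the item per keyword through an if/elif chain, B enumerates every substring of the lowercased item with a length in the keyword range 3..12, looks each up in a keyword->priority dict built once from the category table, keeps the minimum priority seen, and indexes the category list with it.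
import Mathlib
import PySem

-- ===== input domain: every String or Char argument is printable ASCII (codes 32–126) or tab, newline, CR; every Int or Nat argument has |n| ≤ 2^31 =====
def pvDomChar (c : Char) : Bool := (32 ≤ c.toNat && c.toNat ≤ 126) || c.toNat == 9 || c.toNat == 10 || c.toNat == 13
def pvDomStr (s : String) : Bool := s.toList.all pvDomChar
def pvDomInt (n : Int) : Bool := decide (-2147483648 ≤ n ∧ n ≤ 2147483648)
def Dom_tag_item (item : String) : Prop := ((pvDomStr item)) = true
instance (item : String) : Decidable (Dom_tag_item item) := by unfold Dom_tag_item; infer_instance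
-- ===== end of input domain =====

-- B replaces A's 48 per-keyword substring searches by one enumeration of the item's
-- substrings of keyword length (3..12), each looked up in a keyword -> priority dict,
-- keeping the minimum priority; alternative algorithm, same observable result.

-- ===== PORT A =====
def tag_item (item : String) : String :=
  let it := PySem.Str.lower item
  if (["cake", "pie", "cobbler", "cookie", "brownie", "bar", "bun", "muffin", "scone"].any
      (fun w => PySem.Str.isIn w it)) then "dessert"
  else if (["pizza", "burger", "burrito", "taco", "wrap", "sub", "sandwich", "quesadilla", "enchilada"].any
      (fun w => PySem.Str.isIn w it)) then "main_fast"
  else if (["stir fry", "pasta", "ravioli", "lasagna", "penne"].any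
      (fun w => PySem.Str.isIn w it)) then "main_entree"
  else if (["soup", "chowder", "stew"].any
      (fun w => PySem.Str.isIn w it)) then "soup"
  else if (["rice", "potato", "beans", "vegetable", "corn", "salad", "spinach", "greens"].any
      (fun w => PySem.Str.isIn w it)) then "side"
  else if (["oatmeal", "pancake", "waffle", "biscuit", "toast", "cereal", "french toast"].any
      (fun w => PySem.Str.isIn w it)) then "breakfast"
  else if (["sauce", "salsa", "relish", "bread", "roll", "naan", "tortilla"].any
      (fun w => PySem.Str.isIn w it)) then "condiment_or_bread"
  else "other"

-- ===== PORT B =====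
def pvCategories : List String :=
  ["dessert", "main_fast", "main_entree", "soup", "side", "breakfast", "condiment_or_bread", "other"]

def pvKeywordLists : List (List String) :=
  [ ["cake", "pie", "cobbler", "cookie", "brownie", "bar", "bun", "muffin", "scone"],
    ["pizza", "burger", "burrito", "taco", "wrap", "sub", "sandwich", "quesadilla", "enchilada"],
    ["stir fry", "pasta", "ravioli", "lasagna", "penne"],
    ["soup", "chowder", "stew"],
    ["rice", "potato", "beans", "vegetable", "corn", "salad", "spinach", "greens"],
    ["oatmeal", "pancake", "waffle", "biscuit", "toast", "cereal", "french toast"],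
    ["sauce", "salsa", "relish", "bread", "roll", "naan", "tortilla"] ]

-- the dict comprehension {kw: p for p, kws in enumerate(_KEYWORD_LISTS) for kw in kws}
-- (all 48 keys are distinct, so the association list in comprehension order is the dict)
def pvPriority : List (String × Int) :=
  (PySem.List.enumerate pvKeywordLists).flatMap (fun pk => pk.2.map (fun kw => (kw, pk.1)))

def tag_item_alt (item : String) : String :=
  let it := PySem.Str.lower item
  let best : Int :=
    (PySem.List.pyRange 0 (PySem.Str.len it) 1).foldl (fun best i =>
      (PySem.List.pyRange 3 13 1).foldl (fun b L =>
        match pvPriority.lookup (PySem.Str.slice it (some i) (some (i + L))) with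
        | some p => if p < b then p else b
        | none => b) best) 7
  PySem.List.pyGetD pvCategories best ""

-- ===== PRECONDITION & SPEC =====
def Spec_tag_item (item : String) (out : String) : Prop := out = tag_item_alt item
instance (item : String) (out : String) : Decidable (Spec_tag_item item out) := by
  unfold Spec_tag_item; infer_instance

-- ===== CLAIM =====
def Claim_equal_tag_item : Prop := ∀ (item : String), Dom_tag_item item → Spec_tag_item item (tag_item item)

-- ===== LEMMAS AND PROOFS =====

-- proof-side names
def pvKws (q : Nat) : List String := pvKeywordLists.getD q []

def pvMatched (t : String) (q : Nat) : Prop := ∃ kw ∈ pvKws q, kw.toList <:+: t.toList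

def pvBest (t : String) : Int :=
  (PySem.List.pyRange 0 (PySem.Str.len t) 1).foldl (fun best i =>
    (PySem.List.pyRange 3 13 1).foldl (fun b L =>
      match pvPriority.lookup (PySem.Str.slice t (some i) (some (i + L))) with
      | some p => if p < b then p else b
      | none => b) best) 7

-- B's port is literally pyGetD of pvBest
lemma pv_alt_eq (item : String) :
    tag_item_alt item = PySem.List.pyGetD pvCategories (pvBest (PySem.Str.lower item)) "" := rfl

-- generic: first-match lookup finds a key of an association list with no duplicate keys
lemma pv_lookup_of_mem_nodup {β : Type} (l : List (String × β)) (h : (l.map Prod.fst).Nodup)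
    {k : String} {v : β} (hm : (k, v) ∈ l) : l.lookup k = some v := by
  induction l with
  | nil => cases hm
  | cons a l ih =>
    obtain ⟨a1, a2⟩ := a
    rcases List.mem_cons.mp hm with heq | hm
    · injection heq with h1 h2; subst h1; subst h2
      exact List.lookup_cons_self
    · have hne : k ≠ a1 := fun heq =>
        (List.nodup_cons.mp h).1 (heq ▸ List.mem_map.mpr ⟨(k, v), hm, rfl⟩)
      simp only [List.lookup, beq_eq_false_iff_ne.mpr hne]
      exact ih (List.nodup_cons.mp h).2 hm

lemma pv_nodup_keys : (pvPriority.map Prod.fst).Nodup := by decide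

lemma pv_kw_len : ∀ pr ∈ pvPriority, 3 ≤ pr.1.toList.length ∧ pr.1.toList.length ≤ 12 := by decide

-- membership in the priority table
lemma pv_kws_eq (q : Nat) (hq : q < pvKeywordLists.length) : pvKws q = pvKeywordLists[q] :=
  List.getD_eq_getElem pvKeywordLists [] hq

lemma pv_mem_iff (kw : String) (p : Int) :
    (kw, p) ∈ pvPriority ↔ ∃ q : Nat, q < 7 ∧ p = (q : Int) ∧ kw ∈ pvKws q := by
  have hlen : pvKeywordLists.length = 7 := rfl
  constructor
  · intro h
    rcases List.mem_flatMap.mp h with ⟨pk, hpk, hkw⟩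
    rcases (PySem.List.mem_enumerate_iff _ _ _).mp hpk with ⟨q, hq, rfl⟩
    rcases List.mem_map.mp hkw with ⟨kw', hkw', heq⟩
    obtain ⟨rfl, rfl⟩ : kw' = kw ∧ (0 + (q : Int)) = p :=
      ⟨congrArg Prod.fst heq, congrArg Prod.snd heq⟩
    exact ⟨q, hlen ▸ hq, by simp, by rw [pv_kws_eq q hq]; exact hkw'⟩
  · rintro ⟨q, hq, rfl, hkw⟩
    have hq' : q < pvKeywordLists.length := hlen ▸ hq
    refine List.mem_flatMap.mpr ⟨((q : Int), pvKeywordLists[q]'hq'), ?_, ?_⟩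
    · exact (PySem.List.mem_enumerate_iff _ _ _).mpr ⟨q, hq', by simp⟩
    · exact List.mem_map.mpr ⟨kw, by rw [← pv_kws_eq q hq']; exact hkw, rfl⟩

-- nested fold = fold over the flattened list
lemma pv_foldl_flatMap {α β γ : Type} (f : γ → β → γ) (xs : List α) (g : α → List β) (init : γ) :
    xs.foldl (fun b a => (g a).foldl f b) init = (xs.flatMap g).foldl f init := by
  induction xs generalizing init with
  | nil => rfl
  | cons x xs ih => simp [List.foldl_append, ih]

-- the running-minimum fold, characterised
lemma pv_minfold {β : Type} (g : β → Option Int) (xs : List β) : ∀ b : Int,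
    (xs.foldl (fun b x => match g x with | some p => if p < b then p else b | none => b) b ≤ b)
  ∧ (xs.foldl (fun b x => match g x with | some p => if p < b then p else b | none => b) b = b
      ∨ ∃ x ∈ xs, g x = some (xs.foldl (fun b x => match g x with | some p => if p < b then p else b | none => b) b))
  ∧ (∀ x ∈ xs, ∀ p, g x = some p →
      xs.foldl (fun b x => match g x with | some p => if p < b then p else b | none => b) b ≤ p) := by
  induction xs with
  | nil => intro b; simp
  | cons x xs ih =>
    intro b
    simp only [List.foldl_cons]
    rcases hx : g x with _ | p
    · obtain ⟨h1, h2, h3⟩ := ih b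
      refine ⟨h1, ?_, ?_⟩
      · rcases h2 with h2 | ⟨y, hy, hgy⟩
        · exact Or.inl h2
        · exact Or.inr ⟨y, List.mem_cons_of_mem _ hy, hgy⟩
      · intro y hy p hp
        rcases List.mem_cons.mp hy with rfl | hy
        · simp [hx] at hp
        · exact h3 y hy p hp
    · by_cases hlt : p < b
      · simp only [if_pos hlt]
        obtain ⟨h1, h2, h3⟩ := ih p
        refine ⟨h1.trans hlt.le, ?_, ?_⟩
        · rcases h2 with h2 | ⟨y, hy, hgy⟩
          · exact Or.inr ⟨x, List.mem_cons_self, by rw [h2, hx]⟩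
          · exact Or.inr ⟨y, List.mem_cons_of_mem _ hy, hgy⟩
        · intro y hy q hq
          rcases List.mem_cons.mp hy with rfl | hy
          · rw [hx] at hq; injection hq with hq; omega
          · exact h3 y hy q hq
      · simp only [if_neg hlt]
        obtain ⟨h1, h2, h3⟩ := ih b
        refine ⟨h1, ?_, ?_⟩
        · rcases h2 with h2 | ⟨y, hy, hgy⟩
          · exact Or.inl h2
          · exact Or.inr ⟨y, List.mem_cons_of_mem _ hy, hgy⟩
        · intro y hy q hq
          rcases List.mem_cons.mp hy with rfl | hy
          · rw [hx] at hq; injection hq with hq; omega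
          · exact h3 y hy q hq

-- forward bridge: a successful lookup of a slice means that category is matched
lemma pv_lookup_slice (t : String) (i L p : Int) (hi : 0 ≤ i) (hL : 0 ≤ L)
    (h : pvPriority.lookup (PySem.Str.slice t (some i) (some (i + L))) = some p) :
    ∃ q : Nat, q < 7 ∧ p = (q : Int) ∧ pvMatched t q := by
  have hmem : (PySem.Str.slice t (some i) (some (i + L)), p) ∈ pvPriority := by
    rcases List.lookup_eq_some_iff.mp h with ⟨l₁, l₂, hsplit, -⟩
    rw [hsplit]; simp
  rcases (pv_mem_iff _ _).mp hmem with ⟨q, hq, rfl, hkw⟩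
  refine ⟨q, hq, rfl, ⟨_, hkw, ?_⟩⟩
  rw [PySem.Str.toList_slice]
  show PySem.List.slice t.toList (some i) (some (i + L)) <:+: t.toList
  rw [PySem.List.slice_toNat t.toList hi (by omega)]
  exact ((List.take_prefix _ _).isInfix).trans (List.drop_suffix _ _).isInfix

-- backward bridge: a matched category is found by some slice lookup
lemma pv_slice_of_matched (t : String) (q : Nat) (hq : q < 7) (hm : pvMatched t q) :
    ∃ i L : Int, 0 ≤ i ∧ i < (t.toList.length : Int) ∧ 3 ≤ L ∧ L < 13 ∧
      pvPriority.lookup (PySem.Str.slice t (some i) (some (i + L))) = some (q : Int) := by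
  rcases hm with ⟨kw, hkw, hinf⟩
  rcases hinf with ⟨u, v, huv⟩
  have hmem : (kw, (q : Int)) ∈ pvPriority := (pv_mem_iff _ _).mpr ⟨q, hq, rfl, hkw⟩
  have hlen3 : 3 ≤ kw.toList.length := (pv_kw_len _ hmem).1
  have hlen12 : kw.toList.length ≤ 12 := (pv_kw_len _ hmem).2
  have hlent : t.toList.length = u.length + (kw.toList.length + v.length) := by
    rw [← huv]; simp
  refine ⟨(u.length : Int), (kw.toList.length : Int), by positivity, by omega,
    by exact_mod_cast hlen3, by exact_mod_cast (by omega : kw.toList.length < 13), ?_⟩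
  have hslice : PySem.Str.slice t (some (u.length : Int)) (some ((u.length : Int) + (kw.toList.length : Int))) = kw := by
    apply String.toList_injective
    rw [PySem.Str.toList_slice]
    show PySem.List.slice t.toList _ _ = kw.toList
    rw [PySem.List.slice_natCast_add]
    rw [← huv, List.append_assoc, List.drop_left, List.take_left]
  rw [hslice]
  exact pv_lookup_of_mem_nodup _ pv_nodup_keys hmem

-- pvBest characterised against pvMatched
lemma pv_best_spec (t : String) :
    pvBest t ≤ 7
  ∧ (pvBest t = 7 ∨ ∃ q : Nat, q < 7 ∧ pvBest t = (q : Int) ∧ pvMatched t q)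
  ∧ (∀ q : Nat, q < 7 → pvMatched t q → pvBest t ≤ (q : Int)) := by
  have hflat : pvBest t =
      ((PySem.List.pyRange 0 (PySem.Str.len t) 1).flatMap
        (fun i => (PySem.List.pyRange 3 13 1).map (fun L => (i, L)))).foldl
        (fun b x => match pvPriority.lookup (PySem.Str.slice t (some x.1) (some (x.1 + x.2))) with
          | some p => if p < b then p else b
          | none => b) 7 := by
    unfold pvBest
    rw [← pv_foldl_flatMap]
    simp only [List.foldl_map]
  have hmemC : ∀ x : Int × Int,
      x ∈ (PySem.List.pyRange 0 (PySem.Str.len t) 1).flatMap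
        (fun i => (PySem.List.pyRange 3 13 1).map (fun L => (i, L))) ↔
      (0 ≤ x.1 ∧ x.1 < PySem.Str.len t) ∧ (3 ≤ x.2 ∧ x.2 < 13) := by
    intro x
    simp only [List.mem_flatMap, List.mem_map, PySem.List.mem_pyRange_one]
    constructor
    · rintro ⟨i, hi, L, hL, rfl⟩; exact ⟨hi, hL⟩
    · rintro ⟨hi, hL⟩; exact ⟨x.1, hi, x.2, hL, rfl⟩
  obtain ⟨h1, h2, h3⟩ := pv_minfold
    (fun x : Int × Int => pvPriority.lookup (PySem.Str.slice t (some x.1) (some (x.1 + x.2))))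
    ((PySem.List.pyRange 0 (PySem.Str.len t) 1).flatMap
        (fun i => (PySem.List.pyRange 3 13 1).map (fun L => (i, L)))) 7
  rw [← hflat] at h1 h2 h3
  refine ⟨h1, ?_, ?_⟩
  · rcases h2 with h2 | ⟨x, hx, hgx⟩
    · exact Or.inl h2
    · obtain ⟨⟨hi0, hin⟩, ⟨hL3, hL13⟩⟩ := (hmemC x).mp hx
      rcases pv_lookup_slice t x.1 x.2 _ hi0 (by omega) hgx with ⟨q, hq, hpq, hmq⟩
      exact Or.inr ⟨q, hq, hpq, hmq⟩
  · intro q hq hmq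
    rcases pv_slice_of_matched t q hq hmq with ⟨i, L, hi0, hin, hL3, hL13, hlk⟩
    exact h3 (i, L) ((hmemC (i, L)).mpr ⟨⟨hi0, by rw [PySem.Str.len_eq]; exact hin⟩, hL3, hL13⟩) _ hlk

-- A's branch booleans against pvMatched
lemma pv_any_iff (t : String) (q : Nat) :
    ((pvKws q).any (fun w => PySem.Str.isIn w t) = true) ↔ pvMatched t q := by
  simp only [List.any_eq_true, pvMatched, PySem.Str.isIn_iff_infix]

-- the whole equivalence, by cases on the seven branch booleans
lemma pv_final (item : String) : tag_item item = tag_item_alt item := by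
  rw [pv_alt_eq]
  simp only [tag_item]
  set t := PySem.Str.lower item with ht
  obtain ⟨hb7, hbm, hble⟩ := pv_best_spec t
  have hge : (0 : Int) ≤ pvBest t := by
    rcases hbm with h | ⟨q, _, hpq, _⟩
    · omega
    · rw [hpq]; positivity
  by_cases h0 : (["cake", "pie", "cobbler", "cookie", "brownie", "bar", "bun", "muffin", "scone"].any
      (fun w => PySem.Str.isIn w t) = true)
  · rw [if_pos h0]
    have : pvBest t = 0 := le_antisymm (by simpa using hble 0 (by omega) ((pv_any_iff t 0).mp h0)) hge
    rw [this]; rfl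
  rw [if_neg h0]
  have hn0 : ¬ pvMatched t 0 := fun hm => h0 ((pv_any_iff t 0).mpr hm)
  by_cases h1 : (["pizza", "burger", "burrito", "taco", "wrap", "sub", "sandwich", "quesadilla", "enchilada"].any
      (fun w => PySem.Str.isIn w t) = true)
  · rw [if_pos h1]
    have hle := hble 1 (by omega) ((pv_any_iff t 1).mp h1)
    have hne0 : pvBest t ≠ 0 := by
      intro habs
      rcases hbm with h | ⟨q, hq, hpq, hm'⟩
      · omega
      · have : q = 0 := by omega
        exact hn0 (this ▸ hm')
    have : pvBest t = 1 := by push_cast at hle; omega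
    rw [this]; rfl
  rw [if_neg h1]
  have hn1 : ¬ pvMatched t 1 := fun hm => h1 ((pv_any_iff t 1).mpr hm)
  by_cases h2 : (["stir fry", "pasta", "ravioli", "lasagna", "penne"].any
      (fun w => PySem.Str.isIn w t) = true)
  · rw [if_pos h2]
    have hle := hble 2 (by omega) ((pv_any_iff t 2).mp h2)
    have hne : ∀ j : Nat, j < 2 → pvBest t ≠ (j : Int) := by
      intro j hj habs
      rcases hbm with h | ⟨q, hq, hpq, hm'⟩
      · omega
      · have : q = j := by omega
        subst this
        interval_cases q
        · exact hn0 hm'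
        · exact hn1 hm'
    have e0 := hne 0 (by omega); have e1 := hne 1 (by omega)
    have : pvBest t = 2 := by push_cast at hle e0 e1; omega
    rw [this]; rfl
  rw [if_neg h2]
  have hn2 : ¬ pvMatched t 2 := fun hm => h2 ((pv_any_iff t 2).mpr hm)
  by_cases h3 : (["soup", "chowder", "stew"].any (fun w => PySem.Str.isIn w t) = true)
  · rw [if_pos h3]
    have hle := hble 3 (by omega) ((pv_any_iff t 3).mp h3)
    have hne : ∀ j : Nat, j < 3 → pvBest t ≠ (j : Int) := by
      intro j hj habs
      rcases hbm with h | ⟨q, hq, hpq, hm'⟩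
      · omega
      · have : q = j := by omega
        subst this
        interval_cases q
        · exact hn0 hm'
        · exact hn1 hm'
        · exact hn2 hm'
    have e0 := hne 0 (by omega); have e1 := hne 1 (by omega); have e2 := hne 2 (by omega)
    have : pvBest t = 3 := by push_cast at hle e0 e1 e2; omega
    rw [this]; rfl
  rw [if_neg h3]
  have hn3 : ¬ pvMatched t 3 := fun hm => h3 ((pv_any_iff t 3).mpr hm)
  by_cases h4 : (["rice", "potato", "beans", "vegetable", "corn", "salad", "spinach", "greens"].any
      (fun w => PySem.Str.isIn w t) = true)
  · rw [if_pos h4]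
    have hle := hble 4 (by omega) ((pv_any_iff t 4).mp h4)
    have hne : ∀ j : Nat, j < 4 → pvBest t ≠ (j : Int) := by
      intro j hj habs
      rcases hbm with h | ⟨q, hq, hpq, hm'⟩
      · omega
      · have : q = j := by omega
        subst this
        interval_cases q
        · exact hn0 hm'
        · exact hn1 hm'
        · exact hn2 hm'
        · exact hn3 hm'
    have e0 := hne 0 (by omega); have e1 := hne 1 (by omega); have e2 := hne 2 (by omega)
    have e3 := hne 3 (by omega)
    have : pvBest t = 4 := by push_cast at hle e0 e1 e2 e3; omega
    rw [this]; rfl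
  rw [if_neg h4]
  have hn4 : ¬ pvMatched t 4 := fun hm => h4 ((pv_any_iff t 4).mpr hm)
  by_cases h5 : (["oatmeal", "pancake", "waffle", "biscuit", "toast", "cereal", "french toast"].any
      (fun w => PySem.Str.isIn w t) = true)
  · rw [if_pos h5]
    have hle := hble 5 (by omega) ((pv_any_iff t 5).mp h5)
    have hne : ∀ j : Nat, j < 5 → pvBest t ≠ (j : Int) := by
      intro j hj habs
      rcases hbm with h | ⟨q, hq, hpq, hm'⟩
      · omega
      · have : q = j := by omega
        subst this
        interval_cases q
        · exact hn0 hm'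
        · exact hn1 hm'
        · exact hn2 hm'
        · exact hn3 hm'
        · exact hn4 hm'
    have e0 := hne 0 (by omega); have e1 := hne 1 (by omega); have e2 := hne 2 (by omega)
    have e3 := hne 3 (by omega); have e4 := hne 4 (by omega)
    have : pvBest t = 5 := by push_cast at hle e0 e1 e2 e3 e4; omega
    rw [this]; rfl
  rw [if_neg h5]
  have hn5 : ¬ pvMatched t 5 := fun hm => h5 ((pv_any_iff t 5).mpr hm)
  by_cases h6 : (["sauce", "salsa", "relish", "bread", "roll", "naan", "tortilla"].any
      (fun w => PySem.Str.isIn w t) = true)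
  · rw [if_pos h6]
    have hle := hble 6 (by omega) ((pv_any_iff t 6).mp h6)
    have hne : ∀ j : Nat, j < 6 → pvBest t ≠ (j : Int) := by
      intro j hj habs
      rcases hbm with h | ⟨q, hq, hpq, hm'⟩
      · omega
      · have : q = j := by omega
        subst this
        interval_cases q
        · exact hn0 hm'
        · exact hn1 hm'
        · exact hn2 hm'
        · exact hn3 hm'
        · exact hn4 hm'
        · exact hn5 hm'
    have e0 := hne 0 (by omega); have e1 := hne 1 (by omega); have e2 := hne 2 (by omega)
    have e3 := hne 3 (by omega); have e4 := hne 4 (by omega); have e5 := hne 5 (by omega)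
    have : pvBest t = 6 := by push_cast at hle e0 e1 e2 e3 e4 e5; omega
    rw [this]; rfl
  rw [if_neg h6]
  have hn6 : ¬ pvMatched t 6 := fun hm => h6 ((pv_any_iff t 6).mpr hm)
  have : pvBest t = 7 := by
    rcases hbm with h | ⟨q, hq, hpq, hm'⟩
    · exact h
    · exfalso
      interval_cases q
      · exact hn0 hm'
      · exact hn1 hm'
      · exact hn2 hm'
      · exact hn3 hm'
      · exact hn4 hm'
      · exact hn5 hm'
      · exact hn6 hm'
  rw [this]; rfl

-- ===== VERDICT =====
theorem tag_item_spec : Claim_equal_tag_item := by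
  intro item _
  exact pv_final item
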